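-- pv_equiv track=rewrite | github.com/CodyOutcast/Ques | backend_merged/services/project_idea_agent.py | _filter_chinese_blocked_urls
-- ===== SOURCE A (Python) =====
-- from typing import List, Dict, Any, Optional
--
-- def _filter_chinese_blocked_urls(urls: List[str]) -> List[str]:
--     """
--     Filter out URLs that might be blocked by Chinese firewall using Deepseek API
--
--     Args:
--         urls: List of URLs to check
--
--     Returns:
--         List of URLs that are likely accessible in China
--     """
--     if not urls:
--         return urls
--
--     # Common domains known to be blocked in China
--     blocked_domains = [
--         'facebook.com', 'twitter.com', 'youtube.com', 'instagram.com',
--         'google.com', 'gmail.com', 'reddit.com', 'pinterest.com',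
--         'linkedin.com', 'snapchat.com', 'tiktok.com', 'whatsapp.com',
--         'telegram.org', 'discord.com', 'medium.com', 'quora.com'
--     ]
--
--     # Quick filter for known blocked domains
--     filtered_urls = []
--     for url in urls:
--         is_blocked = any(domain in url.lower() for domain in blocked_domains)
--         if not is_blocked:
--             filtered_urls.append(url)
--
--     return filtered_urls
-- ===== SOURCE B (Python) =====
-- from typing import List
--
-- _BLOCKED_DOMAINS = [
--     'facebook.com', 'twitter.com', 'youtube.com', 'instagram.com',
--     'google.com', 'gmail.com', 'reddit.com', 'pinterest.com',
--     'linkedin.com', 'snapchat.com', 'tiktok.com', 'whatsapp.com',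
--     'telegram.org', 'discord.com', 'medium.com', 'quora.com'
-- ]
--
-- # Index the blocked domains by their first character once; a URL is then
-- # scanned left to right and at each position only the (at most two) domains
-- # starting with that character are tested.
-- _BY_FIRST = {}
-- for _d in _BLOCKED_DOMAINS:
--     _BY_FIRST.setdefault(_d[0], []).append(_d)
--
--
-- def _blocked_at_some_position(s):
--     return any(s.startswith(d, i)
--                for i, c in enumerate(s)
--                for d in _BY_FIRST.get(c, []))
--
--
-- def _filter_chinese_blocked_urls(urls: List[str]) -> List[str]:
--     return [u for u in urls if not _blocked_at_some_position(u.lower())]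
-- ===== Notes on version B (the rewrite author's own statement) =====
-- stated objective: alternative
-- what changed: Instead of testing all 16 blocked domains as substrings of each URL, B builds a first-character index (dict) over the domains once and scans each lowered URL position by position, testing only the domains whose first character matches; the filter is a comprehension instead of an accumulator loop.
import Mathlib
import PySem

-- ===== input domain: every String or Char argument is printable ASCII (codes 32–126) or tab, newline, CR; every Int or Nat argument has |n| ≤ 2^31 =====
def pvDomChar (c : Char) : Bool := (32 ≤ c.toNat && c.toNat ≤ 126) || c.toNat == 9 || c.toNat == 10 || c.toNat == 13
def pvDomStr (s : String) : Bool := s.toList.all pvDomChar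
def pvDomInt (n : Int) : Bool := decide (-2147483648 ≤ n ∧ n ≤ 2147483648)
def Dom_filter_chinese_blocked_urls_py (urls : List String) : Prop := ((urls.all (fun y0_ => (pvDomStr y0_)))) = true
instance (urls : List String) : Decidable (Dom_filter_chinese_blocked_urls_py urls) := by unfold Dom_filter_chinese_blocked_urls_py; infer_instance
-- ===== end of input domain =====

-- B replaces A's 16-substring inner scan by a first-character index over the blocked
-- domains and a single position scan of each lowered URL (alternative; return value only).

-- ===== PORT A =====
def pvBlockedDomainsA : List String :=
  ["facebook.com", "twitter.com", "youtube.com", "instagram.com",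
   "google.com", "gmail.com", "reddit.com", "pinterest.com",
   "linkedin.com", "snapchat.com", "tiktok.com", "whatsapp.com",
   "telegram.org", "discord.com", "medium.com", "quora.com"]

def filter_chinese_blocked_urls_py (urls : List String) : List String :=
  if urls = [] then urls
  else
    urls.foldl (fun filtered_urls url =>
      let is_blocked := pvBlockedDomainsA.any (fun domain => PySem.Str.isIn domain (PySem.Str.lower url))
      if is_blocked then filtered_urls else filtered_urls ++ [url]) []

-- ===== PORT B =====
def pvBlockedDomainsB : List String :=
  ["facebook.com", "twitter.com", "youtube.com", "instagram.com",
   "google.com", "gmail.com", "reddit.com", "pinterest.com",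
   "linkedin.com", "snapchat.com", "tiktok.com", "whatsapp.com",
   "telegram.org", "discord.com", "medium.com", "quora.com"]

-- _BY_FIRST: dict from first character to the blocked domains starting with it
-- (d[0] ported as headD ' '; every literal domain is nonempty, so this is exact).
def pvByFirst : PySem.Dict Char (List String) :=
  (pvBlockedDomainsB.map (fun d => (d.toList.headD ' ', d))).foldl
    (fun dict p => dict.modify p.1 [] (· ++ [p.2])) PySem.Dict.empty

-- s.startswith(d, i) for the nonnegative i produced by enumerate(s) is exactly
-- "d.toList is a prefix of s dropped at i".
def pvBlockedAtSomePosition (s : List Char) : Bool :=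
  (PySem.List.enumerate s 0).any (fun p =>
    (pvByFirst.getD p.2 []).any (fun d => List.isPrefixOf d.toList (s.drop p.1.toNat)))

def filter_chinese_blocked_urls_py_alt (urls : List String) : List String :=
  urls.filter (fun u => ! pvBlockedAtSomePosition (PySem.Str.lower u).toList)

-- ===== PRECONDITION & SPEC =====
def Spec_filter_chinese_blocked_urls_py (urls : List String) (out : List String) : Prop := out = filter_chinese_blocked_urls_py_alt urls
instance (urls : List String) (out : List String) : Decidable (Spec_filter_chinese_blocked_urls_py urls out) := by unfold Spec_filter_chinese_blocked_urls_py; infer_instance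

-- ===== CLAIM (what is proved, stated in full; the proofs are below) =====
def Claim_equal_filter_chinese_blocked_urls_py : Prop := ∀ (urls : List String), Dom_filter_chinese_blocked_urls_py urls → Spec_filter_chinese_blocked_urls_py urls (filter_chinese_blocked_urls_py urls)

-- ===== LEMMAS AND PROOFS =====

lemma pvByFirst_getD (c : Char) :
    pvByFirst.getD c [] =
      ((pvBlockedDomainsB.map (fun d => (d.toList.headD ' ', d))).filter (fun p => p.1 == c)).map (·.2) := by
  unfold pvByFirst
  rw [PySem.Dict.getD_foldl_modify_append]
  simp

lemma mem_pvByFirst {c : Char} {d : String} :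
    d ∈ pvByFirst.getD c [] ↔ d ∈ pvBlockedDomainsB ∧ d.toList.headD ' ' = c := by
  rw [pvByFirst_getD]
  simp [List.mem_map, List.mem_filter]

lemma pvBlocked_ne_nil : ∀ d ∈ pvBlockedDomainsB, d.toList ≠ [] := by decide

-- Core: the position scan with the first-character index finds exactly the
-- URLs in which some blocked domain occurs as a substring.
lemma pvScan_eq_any (s : List Char) :
    pvBlockedAtSomePosition s
      = pvBlockedDomainsB.any (fun d => PySem.Chars.isIn d.toList s) := by
  rw [Bool.eq_iff_iff]
  unfold pvBlockedAtSomePosition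
  simp only [List.any_eq_true, PySem.List.mem_enumerate_iff]
  constructor
  · rintro ⟨p, ⟨k, hk, rfl⟩, d, hd, hpre⟩
    rw [mem_pvByFirst] at hd
    refine ⟨d, hd.1, ?_⟩
    rw [← PySem.Chars.exists_prefix_drop_iff_isIn]
    refine ⟨k, ?_⟩
    have hz : ((0 : Int) + (k : Int)).toNat = k := by omega
    simpa [hz, List.isPrefixOf_iff_prefix] using hpre
  · rintro ⟨d, hd, hin⟩
    obtain ⟨j, hj⟩ := (PySem.Chars.exists_prefix_drop_iff_isIn d.toList s).2 hin
    have hdne := pvBlocked_ne_nil d hd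
    have hjlt : j < s.length := by
      by_contra hge
      push Not at hge
      rw [List.drop_eq_nil_of_le hge] at hj
      exact hdne (List.prefix_nil.mp hj)
    refine ⟨((0 : Int) + (j : Int), s[j]), ⟨j, hjlt, rfl⟩, d, ?_, ?_⟩
    · rw [mem_pvByFirst]
      refine ⟨hd, ?_⟩
      obtain ⟨t, ht⟩ := hj
      have h1 : (s.drop j).head? = some s[j] := by
        rw [List.head?_drop, List.getElem?_eq_getElem hjlt]
      rw [← ht] at h1
      cases hdt : d.toList with
      | nil => exact absurd hdt hdne
      | cons a l =>
        rw [hdt] at h1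
        simp at h1
        simp [h1]
    · have hz : ((0 : Int) + (j : Int)).toNat = j := by omega
      simpa [hz, List.isPrefixOf_iff_prefix] using hj

lemma pvPerUrl (u : String) :
    pvBlockedDomainsA.any (fun domain => PySem.Str.isIn domain (PySem.Str.lower u))
      = pvBlockedAtSomePosition (PySem.Str.lower u).toList := by
  rw [pvScan_eq_any]
  rfl

-- ===== VERDICT (by name: the statement is the Claim_ definition above) =====
theorem filter_chinese_blocked_urls_py_spec : Claim_equal_filter_chinese_blocked_urls_py := by
  intro urls _
  unfold Spec_filter_chinese_blocked_urls_py filter_chinese_blocked_urls_py filter_chinese_blocked_urls_py_alt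
  split_ifs with h
  · simp [h]
  · have hfun : (fun (filtered_urls : List String) (url : String) =>
        let is_blocked := pvBlockedDomainsA.any (fun domain => PySem.Str.isIn domain (PySem.Str.lower url))
        if is_blocked then filtered_urls else filtered_urls ++ [url])
      = (fun (acc : List String) (url : String) =>
          if (! pvBlockedAtSomePosition (PySem.Str.lower url).toList) = true then acc ++ [url] else acc) := by
      funext acc url
      rw [show (pvBlockedAtSomePosition (PySem.Str.lower url).toList)
            = pvBlockedDomainsA.any (fun domain => PySem.Str.isIn domain (PySem.Str.lower url)) from (pvPerUrl url).symm]
      cases pvBlockedDomainsA.any (fun domain => PySem.Str.isIn domain (PySem.Str.lower url)) <;> simp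
    rw [hfun, PySem.List.foldl_append_if_eq_filter]
    simp
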